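-- pv_equiv track=rewrite | github.com/jihyuk0414/BackJoonPrac | 프로그래머스/2/64065. 튜플/튜플.py | solution
-- ===== SOURCE A (Python) =====
-- def solution(s):
--     answerdict = {}
--     news = s.replace("{","").replace("}","").split(",")
--     for i in news:
--         if i in answerdict.keys() :
--             answerdict[i]+=1
--         else:
--             answerdict[i]=1
--     realanswerdict=  sorted(answerdict.items(),key=lambda x:x[1],reverse=True)
--
--     answer =[]
--     for j in realanswerdict:
--         answer.append(int(j[0]))
--
--     return answer
-- ===== SOURCE B (Python) =====
-- def solution(s):
--     counts = {}
--     for tok in s.replace("{", "").replace("}", "").split(","):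
--         counts[tok] = counts.get(tok, 0) + 1
--     maxf = 0
--     for c in counts.values():
--         if maxf < c:
--             maxf = c
--     buckets = {}
--     for tok, c in counts.items():
--         buckets.setdefault(c, []).append(int(tok))
--     out = []
--     for c in range(maxf, 0, -1):
--         out.extend(buckets.get(c, []))
--     return out
-- ===== Notes on version B (the rewrite author's own statement) =====
-- stated objective: alternative
-- what changed: Replaces A's comparison sort (sorted by frequency, reverse=True) with a counting/bucket pass: tokens are grouped into a dict of buckets keyed by frequency and emitted from the highest frequency down, preserving first-appearance order within each bucket.
import Mathlib
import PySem

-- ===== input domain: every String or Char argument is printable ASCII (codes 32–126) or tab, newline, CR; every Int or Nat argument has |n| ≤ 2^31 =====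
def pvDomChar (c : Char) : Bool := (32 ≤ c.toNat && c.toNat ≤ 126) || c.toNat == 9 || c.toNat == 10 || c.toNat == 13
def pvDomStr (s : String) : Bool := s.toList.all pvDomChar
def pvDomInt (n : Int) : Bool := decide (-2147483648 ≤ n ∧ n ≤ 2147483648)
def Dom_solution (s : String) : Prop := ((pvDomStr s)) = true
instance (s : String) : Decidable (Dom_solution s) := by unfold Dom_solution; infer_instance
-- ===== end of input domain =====

-- B replaces A's stable comparison sort by frequency with a counting/bucket pass:
-- tokens are grouped into buckets keyed by their frequency and emitted from the highest
-- frequency down, reproducing A's stable descending order and first-appearance tie-break.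

-- ===== PORT A =====
def solution (s : String) : List Int :=
  let news := (PySem.Str.split? (PySem.Str.replace (PySem.Str.replace s "{" "") "}" "") ",").getD []
  let answerdict := news.foldl
    (fun d i => if d.contains i then d.insert i (d.getD i 0 + 1) else d.insert i 1)
    (PySem.Dict.empty : PySem.Dict String Int)
  let realanswerdict := PySem.List.sorted answerdict.items (fun x => x.2) true
  -- int(j[0]): Pre_solution guarantees every token parses, so getD 0 is never reached
  realanswerdict.foldl (fun answer j => answer ++ [(PySem.Int.ofStr? j.1).getD 0]) []

-- ===== PORT B =====
-- buckets.setdefault(c, []).append(v) is ported as insert c (getD c [] ++ [v]):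
-- both leave the key at its existing position (or append a fresh key) with the value extended.
def solution_alt (s : String) : List Int :=
  let counts := ((PySem.Str.split? (PySem.Str.replace (PySem.Str.replace s "{" "") "}" "") ",").getD []).foldl
    (fun d tok => d.insert tok (d.getD tok 0 + 1)) (PySem.Dict.empty : PySem.Dict String Int)
  let maxf := counts.values.foldl (fun m c => if m < c then c else m) 0
  let buckets := counts.items.foldl
    (fun b p => b.insert p.2 (b.getD p.2 [] ++ [(PySem.Int.ofStr? p.1).getD 0]))
    (PySem.Dict.empty : PySem.Dict Int (List Int))
  (PySem.List.pyRange maxf 0 (-1)).foldl (fun out c => out ++ buckets.getD c []) []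

-- ===== PRECONDITION & SPEC =====
-- Pre_ excludes exactly the inputs where A raises ValueError: some comma-separated token
-- (after stripping braces) is not a valid int() literal.
def Pre_solution (s : String) : Prop :=
  ∀ t ∈ (PySem.Str.split? (PySem.Str.replace (PySem.Str.replace s "{" "") "}" "") ",").getD [],
    (PySem.Int.ofStr? t).isSome = true
instance (s : String) : Decidable (Pre_solution s) := by unfold Pre_solution; infer_instance

def pvWitness_solution : String := "{{2},{2,1},{2,1,3},{2,1,3,4}}"

def Spec_solution (s : String) (out : List Int) : Prop := out = solution_alt s
instance (s : String) (out : List Int) : Decidable (Spec_solution s out) := by unfold Spec_solution; infer_instance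

-- ===== CLAIM (what is proved, stated in full; the proofs are below) =====
def Claim_equal_solution : Prop := ∀ (s : String), Dom_solution s → Pre_solution s → Spec_solution s (solution s)

-- ===== LEMMAS AND PROOFS =====

-- pyRange m 0 (-1) enumerates m, m-1, ..., 1
theorem pyRange_down_cons (m : Int) (h : 0 < m) :
    PySem.List.pyRange m 0 (-1) = m :: PySem.List.pyRange (m - 1) 0 (-1) := by
  unfold PySem.List.pyRange
  norm_num
  have h1 : m.toNat = (m-1).toNat + 1 := by omega
  rcases lt_or_ge 0 (m-1) with h2 | h2
  · simp only [if_pos h]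
    rw [h1, List.range_succ_eq_map]
    simp [List.map_map]
    rw [if_pos (by omega : 1 < m)]
    have h3 : (m-1).toNat = m.toNat - 1 := by omega
    rw [← h3]
    apply List.map_congr_left; intro k _
    simp [Function.comp]; ring
  · have hm : m = 1 := by omega
    subst hm
    decide
theorem mem_pyRange_down (n : Nat) : ∀ c ∈ PySem.List.pyRange (n : Int) 0 (-1), 1 ≤ c ∧ c ≤ (n : Int) := by
  induction n with
  | zero => intro c hc; simp [PySem.List.pyRange] at hc
  | succ k ih =>
    intro c hc
    rw [pyRange_down_cons _ (by push_cast; omega)] at hc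
    rcases List.mem_cons.mp hc with hc | hc
    · omega
    · have hk : ((k+1 : Nat) : Int) - 1 = (k : Int) := by push_cast; ring
      rw [hk] at hc
      have := ih c hc
      push_cast
      omega

theorem insertBy_cons (α : Type) (before : α → α → Bool) (x a : α) (l : List α) :
    PySem.List.insertBy before x (a :: l) =
      if before x a then x :: a :: l else a :: PySem.List.insertBy before x l := rfl
theorem insertBy_append_of_not {α : Type} (before : α → α → Bool) (x : α) (as bs : List α)
    (h : ∀ a ∈ as, before x a = false) :
    PySem.List.insertBy before x (as ++ bs) = as ++ PySem.List.insertBy before x bs := by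
  induction as with
  | nil => simp
  | cons a rest ih =>
    have ha : before x a = false := h a (by simp)
    rw [List.cons_append, insertBy_cons, ha]
    simp only [Bool.false_eq_true, if_false, List.cons_append]
    rw [ih (fun a ha => h a (by simp [ha]))]

theorem sorted_rev_split {α : Type} (key : α → Int) (m : Int) (xs : List α)
    (h : ∀ x ∈ xs, key x ≤ m) :
    PySem.List.sorted xs key true =
      xs.filter (fun x => key x == m) ++
        PySem.List.sorted (xs.filter (fun x => !(key x == m))) key true := by
  induction xs using List.reverseRecOn with
  | nil => simp [PySem.List.sorted]
  | append_singleton l x ih =>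
    have hl : ∀ y ∈ l, key y ≤ m := fun y hy => h y (by simp [hy])
    have hx : key x ≤ m := h x (by simp)
    have hsl : PySem.List.sorted (l ++ [x]) key true =
        PySem.List.insertBy (fun a b => decide (key b < key a)) x (PySem.List.sorted l key true) := by
      rw [PySem.List.sorted_rev_eq_foldl_insertBy, PySem.List.sorted_rev_eq_foldl_insertBy,
        List.foldl_append]
      rfl
    set A := l.filter (fun y => key y == m) with hA
    set B := PySem.List.sorted (l.filter (fun y => !(key y == m))) key true with hB
    have hAkey : ∀ a ∈ A, key a = m := by
      intro a ha; rw [hA] at ha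
      have := (List.mem_filter.mp ha).2
      simpa using this
    have hBkey : ∀ b ∈ B, key b < m := by
      intro b hb; rw [hB, PySem.List.mem_sorted] at hb
      have h1 := (List.mem_filter.mp hb).1
      have h2 := (List.mem_filter.mp hb).2
      have := hl b h1
      simp at h2
      omega
    rw [hsl, ih hl]
    by_cases hxm : key x = m
    · have hpass : ∀ a ∈ A, (fun a b => decide (key b < key a)) x a = false := by
        intro a ha; simp [hAkey a ha, hxm]
      rw [insertBy_append_of_not _ _ _ _ hpass]
      have hins : PySem.List.insertBy (fun a b => decide (key b < key a)) x B = x :: B := by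
        cases hBcase : B with
        | nil => rfl
        | cons b B' =>
          rw [insertBy_cons]
          have : key b < m := hBkey b (by rw [hBcase]; simp)
          simp [hxm, this]
      rw [hins]
      have hfm : (l ++ [x]).filter (fun y => key y == m) = A ++ [x] := by
        simp [hA, List.filter_append, hxm]
      have hfn : (l ++ [x]).filter (fun y => !(key y == m)) = l.filter (fun y => !(key y == m)) := by
        simp [List.filter_append, hxm]
      rw [hfm, hfn, ← hB]
      simp
    · have hxlt : key x < m := lt_of_le_of_ne hx hxm
      have hpass : ∀ a ∈ A, (fun a b => decide (key b < key a)) x a = false := by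
        intro a ha; simp [hAkey a ha]; omega
      rw [insertBy_append_of_not _ _ _ _ hpass]
      have hfm : (l ++ [x]).filter (fun y => key y == m) = A := by
        simp [hA, List.filter_append, hxm]
      have hfn : (l ++ [x]).filter (fun y => !(key y == m)) =
          l.filter (fun y => !(key y == m)) ++ [x] := by
        simp [List.filter_append, hxm]
      rw [hfm, hfn]
      congr 1
      rw [hB, PySem.List.sorted_rev_eq_foldl_insertBy, PySem.List.sorted_rev_eq_foldl_insertBy,
        List.foldl_append]
      rfl
      -- appended

theorem sorted_rev_eq_flatMap_filter {α : Type} (key : α → Int) (n : Nat) :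
    ∀ xs : List α, (∀ x ∈ xs, 1 ≤ key x ∧ key x ≤ (n : Int)) →
    PySem.List.sorted xs key true =
      (PySem.List.pyRange (n : Int) 0 (-1)).flatMap (fun c => xs.filter (fun x => key x == c)) := by
  induction n with
  | zero =>
    intro xs h
    have hnil : xs = [] := by
      cases xs with
      | nil => rfl
      | cons y ys => exact absurd (h y (by simp)) (by simp; omega)
    subst hnil
    simp [PySem.List.sorted, PySem.List.pyRange]
  | succ k ih =>
    intro xs h
    have hm : ((k+1 : Nat) : Int) - 1 = (k : Int) := by push_cast; ring
    rw [pyRange_down_cons _ (by push_cast; omega), hm, List.flatMap_cons]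
    rw [sorted_rev_split key ((k+1 : Nat) : Int) xs (fun x hx => (h x hx).2)]
    congr 1
    rw [ih (xs.filter (fun x => !(key x == ((k+1 : Nat) : Int))))
      (by
        intro x hx
        have h1 := (List.mem_filter.mp hx).1
        have h2 := (List.mem_filter.mp hx).2
        have := h x h1
        simp at h2
        push_cast at this ⊢
        omega)]
    apply List.flatMap_congr
    intro c hc
    have hcb := mem_pyRange_down k c hc
    rw [List.filter_filter]
    apply List.filter_congr
    intro x _
    by_cases hxc : key x = c
    · simp [hxc]
      omega
    · simp [hxc]

theorem buckets_getD {α : Type} (g : α × Int → Int) :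
    ∀ (ps : List (α × Int)) (b : PySem.Dict Int (List Int)) (c : Int),
    (ps.foldl (fun b p => b.insert p.2 (b.getD p.2 [] ++ [g p])) b).getD c [] =
      b.getD c [] ++ (ps.filter (fun p => p.2 == c)).map g := by
  intro ps
  induction ps with
  | nil => simp
  | cons p rest ih =>
    intro b c
    rw [List.foldl_cons, ih]
    by_cases hc : p.2 = c
    · simp [hc, PySem.Dict.getD_insert_self]
    · rw [PySem.Dict.getD_insert_of_ne _ _ _ (by omega)]
      simp [hc]
theorem foldl_if_max (l : List Int) : ∀ a : Int,
    a ≤ l.foldl (fun m c => if m < c then c else m) a ∧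
    ∀ c ∈ l, c ≤ l.foldl (fun m c => if m < c then c else m) a := by
  have hmax : ∀ (m c : Int), (if m < c then c else m) = max m c := by
    intro m c; by_cases h : m < c
    · simp [h]; omega
    · simp [h]; omega
  intro a
  have : (fun m c : Int => if m < c then c else m) = max := by
    funext m c; exact hmax m c
  rw [this]
  exact PySem.List.le_foldl_max l a

theorem main_eq (s : String) : solution s = solution_alt s := by
  unfold solution solution_alt
  dsimp only
  set news := (PySem.Str.split? (PySem.Str.replace (PySem.Str.replace s "{" "") "}" "") ",").getD [] with hnews
  -- A's counting loop is B's counting loop is Counter(news)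
  have hcnt : news.foldl
      (fun d i => if d.contains i then d.insert i (d.getD i 0 + 1) else d.insert i 1)
      (PySem.Dict.empty : PySem.Dict String Int) = PySem.Dict.counter news := by
    rw [PySem.List.foldl_congr_mem news _
      (fun d i => d.insert i (d.getD i 0 + 1)) PySem.Dict.empty ?_]
    · exact PySem.Dict.foldl_insert_getD_add_one_eq_counter news
    · intro d i _
      by_cases h : d.contains i
      · simp [h]
      · rw [if_neg (by simp [h])]
        show d.insert i 1 = d.insert i (d.getD i 0 + 1)
        rw [PySem.Dict.getD_of_not_contains d 0 (by simp [h])]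
        norm_num
  rw [hcnt, PySem.Dict.foldl_insert_getD_add_one_eq_counter]
  set items := (PySem.Dict.counter news).items with hitems
  set g : String × Int → Int := fun j => (PySem.Int.ofStr? j.1).getD 0 with hg
  set maxf := (PySem.Dict.counter news).values.foldl (fun m c => if m < c then c else m) 0 with hmaxf
  have hvals : (PySem.Dict.counter news).values = items.map (fun p => p.2) := rfl
  have hmax := foldl_if_max (PySem.Dict.counter news).values 0
  have h0 : (0:Int) ≤ maxf := hmax.1
  have hub : ∀ p ∈ items, p.2 ≤ maxf := by
    intro p hp
    exact hmax.2 p.2 (by rw [hvals]; exact List.mem_map_of_mem hp)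
  have hlb : ∀ p ∈ items, 1 ≤ p.2 := by
    intro p hp
    rw [hitems, PySem.Dict.items_counter] at hp
    obtain ⟨k, hk, hpk⟩ := List.mem_map.mp hp
    have hkn : k ∈ news := (PySem.Set.mem_ofList news k).mp hk
    have : 0 < news.count k := List.count_pos_iff.mpr hkn
    rw [← hpk]
    dsimp only
    exact_mod_cast this
  -- A = map g over the stable reverse sort
  rw [PySem.List.foldl_append_singleton_eq_map g (PySem.List.sorted items (fun x => x.2) true) []]
  rw [List.nil_append]
  -- the sort is the descending concatenation of frequency classes
  have hnat : ((maxf.toNat : Nat) : Int) = maxf := Int.toNat_of_nonneg h0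
  rw [sorted_rev_eq_flatMap_filter (fun x : String × Int => x.2) maxf.toNat items
    (by intro p hp; rw [hnat]; exact ⟨hlb p hp, hub p hp⟩)]
  rw [hnat, List.map_flatMap]
  -- B's final loop reads the buckets back as exactly those classes
  rw [PySem.List.foldl_append_eq_flatMap _ (PySem.List.pyRange maxf 0 (-1)) []]
  rw [List.nil_append]
  apply List.flatMap_congr
  intro c _
  rw [buckets_getD g items PySem.Dict.empty c]
  simp

-- ===== VERDICT (by name: the statement is the Claim_ definition above) =====
theorem solution_spec : Claim_equal_solution := by
  intro s _ _
  unfold Spec_solution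
  exact main_eq s
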